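-- pv_equiv track=rewrite | github.com/PrestigiousP/Jpg-to-ASCCII-filter | main.py | calc_range
-- ===== SOURCE A (Python) =====
-- def calc_range(pix_val, step):
--     incr = step
--     count = 0
--     while pix_val > incr:
--         count += 1
--         incr += step
--         if incr > 255:
--             count = 5
--             break
--     return count
-- ===== SOURCE B (Python) =====
-- def calc_range(pix_val, step):
--     if pix_val <= step:
--         return 0
--     m = (pix_val - 1) // step
--     return 5 if m >= max(1, 255 // step) else m
-- ===== Notes on version B (the rewrite author's own statement) =====
-- stated objective: simpler
-- what changed: Replaces the incremental while-loop with a closed-form floor-division count plus a single cap test.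
import Mathlib
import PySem

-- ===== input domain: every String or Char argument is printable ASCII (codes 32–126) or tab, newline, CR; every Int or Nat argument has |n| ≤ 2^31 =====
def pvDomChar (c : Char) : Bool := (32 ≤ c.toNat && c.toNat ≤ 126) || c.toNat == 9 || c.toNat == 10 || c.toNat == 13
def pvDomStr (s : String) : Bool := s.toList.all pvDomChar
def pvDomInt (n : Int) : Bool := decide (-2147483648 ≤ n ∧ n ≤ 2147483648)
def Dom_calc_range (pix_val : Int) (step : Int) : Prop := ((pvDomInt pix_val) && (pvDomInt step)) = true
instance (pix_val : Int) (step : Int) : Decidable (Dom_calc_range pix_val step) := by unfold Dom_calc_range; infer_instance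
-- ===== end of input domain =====

-- B replaces A's incremental while-loop by a closed-form floor-division count with a single cap test (simpler).
-- Pre_ excludes step <= 0 with pix_val > step, where A loops forever.


-- ===== PORT A =====
-- A's while-loop, fuel-bounded; under Pre_ (step ≥ 1, or returning before any iteration)
-- at most 256 iterations happen, so fuel 300 is never exhausted.
def calcLoop (pix_val step : Int) : Nat → Int → Int → Int
  | 0, _, count => count
  | n+1, incr, count =>
    if pix_val > incr then
      let incr' := incr + step
      if incr' > 255 then 5
      else calcLoop pix_val step n incr' (count + 1)
    else count

def calc_range (pix_val : Int) (step : Int) : Int :=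
  calcLoop pix_val step 300 step 0

-- ===== PORT B =====
def calc_range_alt (pix_val : Int) (step : Int) : Int :=
  if pix_val ≤ step then 0
  else
    let m := PySem.Int.floordiv (pix_val - 1) step
    if m ≥ max 1 (PySem.Int.floordiv 255 step) then 5 else m

-- ===== PRECONDITION & SPEC =====
-- Pre_ excludes exactly the inputs where A's while-loop never terminates (step ≤ 0 with pix_val > step).
def Pre_calc_range (pix_val : Int) (step : Int) : Prop := 1 ≤ step ∨ pix_val ≤ step
instance (pix_val : Int) (step : Int) : Decidable (Pre_calc_range pix_val step) := by unfold Pre_calc_range; infer_instance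
def pvWitness_calc_range : Int × Int := (200, 51)

def Spec_calc_range (pix_val : Int) (step : Int) (out : Int) : Prop := out = calc_range_alt pix_val step
instance (pix_val : Int) (step : Int) (out : Int) : Decidable (Spec_calc_range pix_val step out) := by unfold Spec_calc_range; infer_instance

-- ===== CLAIM (what is proved, stated in full; the proofs are below) =====
def Claim_equal_calc_range : Prop := ∀ (pix_val : Int) (step : Int), Dom_calc_range pix_val step → Pre_calc_range pix_val step → Spec_calc_range pix_val step (calc_range pix_val step)

-- ===== LEMMAS AND PROOFS =====

-- one-step unfolding of the fuelled loop
theorem calcLoop_succ (pix_val step : Int) (n : Nat) (incr count : Int) :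
    calcLoop pix_val step (n + 1) incr count =
      if pix_val > incr then
        (if incr + step > 255 then 5 else calcLoop pix_val step n (incr + step) (count + 1))
      else count := rfl

-- Loop invariant: at the start of an iteration the loop state is incr = k*step,
-- count = k-1, with 1 ≤ k, k*step ≤ 255, pix_val > (k-1)*step, and enough fuel.
theorem calcLoop_inv (pix_val step : Int) (hs : 1 ≤ step) :
    ∀ (n : Nat) (k : Int), 1 ≤ k → k * step ≤ 255 → pix_val > (k - 1) * step →
      256 ≤ (n : Int) + k →
      calcLoop pix_val step n (k * step) (k - 1) = calc_range_alt pix_val step := by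
  intro n
  induction n with
  | zero =>
    intro k hk1 hk255 _ hn
    exfalso
    have : k ≤ k * step := le_mul_of_one_le_right (by omega) hs
    omega
  | succ n ih =>
    intro k hk1 hk255 hgt hn
    have hfd : ∀ a : Int, PySem.Int.floordiv a step = a / step :=
      fun a => PySem.Int.floordiv_eq_ediv_of_pos (by omega)
    have hks : step ≤ k * step := le_mul_of_one_le_left (by omega) hk1
    have e0 : (k - 1) * step = k * step - step := by ring
    have e1 : (k + 1) * step = k * step + step := by ring
    rw [calcLoop_succ]
    by_cases hle : pix_val > k * step
    · rw [if_pos hle]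
      by_cases hbr : k * step + step > 255
      · -- break: count = 5.  B also gives 5: m ≥ k ≥ 255//step and m ≥ 1.
        rw [if_pos hbr]
        have hm : k ≤ (pix_val - 1) / step := by
          rw [Int.le_ediv_iff_mul_le (by omega)]; omega
        have h255 : 255 / step ≤ k := by
          have h := Int.ediv_lt_iff_lt_mul (a := 255) (b := k + 1) (by omega : (0:Int) < step)
          omega
        unfold calc_range_alt
        rw [if_neg (by omega)]
        simp only [hfd]
        rw [if_pos (by rw [ge_iff_le, max_le_iff]; omega)]
      · -- continue with k+1
        rw [if_neg hbr]
        have hrw : k * step + step = (k + 1) * step := by ring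
        have hrw2 : k - 1 + 1 = (k + 1) - 1 := by ring
        have e2 : (k + 1 - 1) * step = k * step := by ring
        rw [hrw, hrw2]
        exact ih (k + 1) (by omega) (by omega) (by omega) (by omega)
    · -- exit: count = k-1.  B: m = (pix_val-1)/step = k-1, below the cap.
      rw [if_neg hle]
      by_cases hsmall : pix_val ≤ step
      · -- then k = 1 and both sides are 0
        have hk : k = 1 := by
          by_contra hne
          have h2 : (2:Int) ≤ k := by omega
          nlinarith [mul_le_mul_of_nonneg_right h2 (show (0:Int) ≤ step by omega)]
        unfold calc_range_alt
        rw [if_pos hsmall]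
        omega
      · have hmeq : (pix_val - 1) / step = k - 1 := by
          have h1 : k - 1 ≤ (pix_val - 1) / step := by
            rw [Int.le_ediv_iff_mul_le (by omega)]; omega
          have h2 : (pix_val - 1) / step < k := by
            rw [Int.ediv_lt_iff_lt_mul (by omega)]; omega
          omega
        have h255 : k ≤ 255 / step := by
          rw [Int.le_ediv_iff_mul_le (by omega)]; omega
        unfold calc_range_alt
        rw [if_neg hsmall]
        simp only [hfd]
        rw [if_neg (by rw [ge_iff_le, max_le_iff]; omega), hmeq]

-- ===== VERDICT (by name: the statement is the Claim_ definition above) =====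
theorem calc_range_spec : Claim_equal_calc_range := by
  intro pix_val step _ hpre
  unfold Spec_calc_range calc_range
  by_cases h0 : pix_val ≤ step
  · -- zero iterations on both sides
    rw [show (300:Nat) = 299 + 1 from rfl, calcLoop_succ, if_neg (by omega)]
    unfold calc_range_alt
    rw [if_pos h0]
  · have hs : 1 ≤ step := by rcases hpre with h | h; exacts [h, absurd h h0]
    by_cases hbig : step ≤ 255
    · have h1 := calcLoop_inv pix_val step hs 300 1 le_rfl (by rw [one_mul]; omega)
        (by simp only [sub_self, zero_mul]; omega) (by norm_num)
      simpa using h1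
    · -- step > 255: one iteration then break with 5
      rw [show (300:Nat) = 299 + 1 from rfl, calcLoop_succ,
        if_pos (show pix_val > step by omega), if_pos (show step + step > 255 by omega)]
      have hm : 1 ≤ (pix_val - 1) / step := by
        rw [Int.le_ediv_iff_mul_le (by omega)]; omega
      have hz : (255:Int) / step = 0 := Int.ediv_eq_zero_of_lt (by omega) (by omega)
      unfold calc_range_alt
      rw [if_neg h0]
      simp only [PySem.Int.floordiv_eq_ediv_of_pos (show (0:Int) < step by omega)]
      rw [if_pos (by rw [ge_iff_le, max_le_iff]; omega)]
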